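-- pv_equiv track=rewrite | github.com/laurambarreto/Processamento_Linguagem_Natural_1 | Projeto1/Regras.py | contagem_por_polaridade
-- ===== SOURCE A (Python) =====
-- from collections import Counter
--
-- def contagem_por_polaridade (sentimentos, linha):
--     positividade = 0
--     negatividade = 0
--     neutralidade = 0
--     palavras_negativas = Counter()
--     palavras_positivas = Counter()
--     palavras_neutras = Counter()
--     for word in linha.split ():
--         word = word.lower()
--         if word in sentimentos:
--             POL = sentimentos[word]
--             if POL == "-1":
--                 negatividade += 1
--                 palavras_negativas[word] += 1
--             elif POL == "0":
--                 neutralidade += 1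
--                 palavras_neutras[word] += 1
--             else:
--                 positividade += 1
--                 palavras_positivas[word] += 1
--
--     return negatividade,neutralidade, positividade, palavras_negativas, palavras_positivas, palavras_neutras
-- ===== SOURCE B (Python) =====
-- from collections import Counter
--
-- def contagem_por_polaridade(sentimentos, linha):
--     # Decomposed: collect (word, polarity) hits once, then three filter passes
--     # and Counter builds; counts are just list lengths. No running accumulators.
--     hits = [(w, sentimentos[w]) for w in map(str.lower, linha.split()) if w in sentimentos]
--     neg = [w for w, p in hits if p == "-1"]
--     neu = [w for w, p in hits if p == "0"]
--     pos = [w for w, p in hits if p != "-1" and p != "0"]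
--     return len(neg), len(neu), len(pos), Counter(neg), Counter(pos), Counter(neu)
-- ===== Notes on version B (the rewrite author's own statement) =====
-- stated objective: alternative
-- what changed: Replaces A's single loop with six running accumulators (three counts, three incrementally-updated Counters) by a pipeline: one comprehension collecting (word, polarity) hits, three declarative filters, counts as list lengths and Counters built in one shot from the filtered lists.
import Mathlib
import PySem

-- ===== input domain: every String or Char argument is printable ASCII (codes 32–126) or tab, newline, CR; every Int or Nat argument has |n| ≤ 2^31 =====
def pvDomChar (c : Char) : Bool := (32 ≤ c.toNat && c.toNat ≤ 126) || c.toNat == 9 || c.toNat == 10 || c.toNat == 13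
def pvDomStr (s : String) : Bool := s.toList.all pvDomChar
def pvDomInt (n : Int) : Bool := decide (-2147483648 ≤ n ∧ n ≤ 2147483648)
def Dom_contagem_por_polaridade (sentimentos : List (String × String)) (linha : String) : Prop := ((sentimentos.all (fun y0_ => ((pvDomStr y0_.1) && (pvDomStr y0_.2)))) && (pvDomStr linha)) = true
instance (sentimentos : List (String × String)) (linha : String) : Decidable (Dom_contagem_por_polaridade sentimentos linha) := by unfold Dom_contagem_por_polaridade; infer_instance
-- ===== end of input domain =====

-- B replaces A's single loop with six running accumulators by a hits-then-filter
-- pipeline (counts as list lengths, Counters built in one shot); alternative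
-- decomposition, same asymptotic cost.


-- ===== PORT A =====
-- A's loop state, in the return-tuple order:
-- (negatividade, neutralidade, positividade, palavras_negativas, palavras_positivas, palavras_neutras)
abbrev pvStateA : Type :=
  Int × Int × Int × PySem.Dict String Int × PySem.Dict String Int × PySem.Dict String Int

-- one iteration of A's `for word in linha.split()` body
def pvStepA (d : PySem.Dict String String) (st : pvStateA) (w0 : String) : pvStateA :=
  let w := PySem.Str.lower w0
  match d.get? w with
  | none => st
  | some pol =>
    if pol == "-1" then
      (st.1 + 1, st.2.1, st.2.2.1, st.2.2.2.1.modify w 0 (· + 1), st.2.2.2.2.1, st.2.2.2.2.2)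
    else if pol == "0" then
      (st.1, st.2.1 + 1, st.2.2.1, st.2.2.2.1, st.2.2.2.2.1, st.2.2.2.2.2.modify w 0 (· + 1))
    else
      (st.1, st.2.1, st.2.2.1 + 1, st.2.2.2.1, st.2.2.2.2.1.modify w 0 (· + 1), st.2.2.2.2.2)

def contagem_por_polaridade (sentimentos : List (String × String)) (linha : String) :
    Int × Int × Int × (List (String × Int)) × (List (String × Int)) × (List (String × Int)) :=
  let d := PySem.Dict.mk sentimentos
  let st := (PySem.Str.split₀ linha).foldl (pvStepA d)
    (0, 0, 0, PySem.Dict.empty, PySem.Dict.empty, PySem.Dict.empty)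
  (st.1, st.2.1, st.2.2.1, st.2.2.2.1.items, st.2.2.2.2.1.items, st.2.2.2.2.2.items)

-- ===== PORT B =====
def contagem_por_polaridade_alt (sentimentos : List (String × String)) (linha : String) :
    Int × Int × Int × (List (String × Int)) × (List (String × Int)) × (List (String × Int)) :=
  let d := PySem.Dict.mk sentimentos
  let hits := ((PySem.Str.split₀ linha).map PySem.Str.lower).filterMap
    (fun w => (d.get? w).map (fun p => (w, p)))
  let neg := (hits.filter (fun wp => wp.2 == "-1")).map Prod.fst
  let neu := (hits.filter (fun wp => wp.2 == "0")).map Prod.fst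
  let pos := (hits.filter (fun wp => wp.2 != "-1" && wp.2 != "0")).map Prod.fst
  ((neg.length : Int), (neu.length : Int), (pos.length : Int),
   (PySem.Dict.counter neg).items, (PySem.Dict.counter pos).items, (PySem.Dict.counter neu).items)

-- ===== PRECONDITION & SPEC =====
def Spec_contagem_por_polaridade (sentimentos : List (String × String)) (linha : String) (out : Int × Int × Int × (List (String × Int)) × (List (String × Int)) × (List (String × Int))) : Prop := out = contagem_por_polaridade_alt sentimentos linha
instance (sentimentos : List (String × String)) (linha : String) (out : Int × Int × Int × (List (String × Int)) × (List (String × Int)) × (List (String × Int))) : Decidable (Spec_contagem_por_polaridade sentimentos linha out) := by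
  unfold Spec_contagem_por_polaridade
  haveI : DecidableEq (List (String × Int)) := inferInstance
  infer_instance

-- ===== CLAIM (what is proved, stated in full; the proofs are below) =====
def Claim_equal_contagem_por_polaridade : Prop := ∀ (sentimentos : List (String × String)) (linha : String), Dom_contagem_por_polaridade sentimentos linha → Spec_contagem_por_polaridade sentimentos linha (contagem_por_polaridade sentimentos linha)

-- ===== LEMMAS AND PROOFS =====
def pvBump (d : PySem.Dict String Int) (x : String) : PySem.Dict String Int :=
  d.modify x 0 (· + 1)

def pvHits (d : PySem.Dict String String) (ws : List String) : List (String × String) :=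
  (ws.map PySem.Str.lower).filterMap (fun w => (d.get? w).map (fun p => (w, p)))

def pvNeg (d : PySem.Dict String String) (ws : List String) : List String :=
  ((pvHits d ws).filter (fun wp => wp.2 == "-1")).map Prod.fst
def pvNeu (d : PySem.Dict String String) (ws : List String) : List String :=
  ((pvHits d ws).filter (fun wp => wp.2 == "0")).map Prod.fst
def pvPos (d : PySem.Dict String String) (ws : List String) : List String :=
  ((pvHits d ws).filter (fun wp => wp.2 != "-1" && wp.2 != "0")).map Prod.fst

theorem pvFold_invariant (d : PySem.Dict String String) (ws : List String)
    (n u p : Int) (d1 d2 d3 : PySem.Dict String Int) :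
    ws.foldl (pvStepA d) (n, u, p, d1, d2, d3) =
      (n + (pvNeg d ws).length, u + (pvNeu d ws).length, p + (pvPos d ws).length,
       (pvNeg d ws).foldl pvBump d1, (pvPos d ws).foldl pvBump d2, (pvNeu d ws).foldl pvBump d3) := by
  induction ws generalizing n u p d1 d2 d3 with
  | nil => simp [pvNeg, pvNeu, pvPos, pvHits]
  | cons w ws ih =>
    simp only [List.foldl_cons]
    have hhits : pvHits d (w :: ws) =
        (match d.get? (PySem.Str.lower w) with
         | none => pvHits d ws
         | some pol => (PySem.Str.lower w, pol) :: pvHits d ws) := by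
      cases h : d.get? (PySem.Str.lower w) <;> simp [pvHits, h]
    cases h : d.get? (PySem.Str.lower w) with
    | none =>
      have : pvStepA d (n, u, p, d1, d2, d3) w = (n, u, p, d1, d2, d3) := by
        simp [pvStepA, h]
      rw [this, ih]
      simp [pvNeg, pvNeu, pvPos, hhits, h]
    | some pol =>
      by_cases h1 : pol = "-1"
      · have hstep : pvStepA d (n, u, p, d1, d2, d3) w =
            (n + 1, u, p, pvBump d1 (PySem.Str.lower w), d2, d3) := by
          simp [pvStepA, h, h1, pvBump]
        rw [hstep, ih]
        have hneg : pvNeg d (w :: ws) = PySem.Str.lower w :: pvNeg d ws := by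
          simp [pvNeg, hhits, h, h1]
        have hneu : pvNeu d (w :: ws) = pvNeu d ws := by
          simp [pvNeu, hhits, h, h1]
        have hpos : pvPos d (w :: ws) = pvPos d ws := by
          simp [pvPos, hhits, h, h1]
        rw [hneg, hneu, hpos]
        simp [List.foldl_cons, Prod.mk.injEq]
        omega
      · by_cases h2 : pol = "0"
        · have hstep : pvStepA d (n, u, p, d1, d2, d3) w =
              (n, u + 1, p, d1, d2, pvBump d3 (PySem.Str.lower w)) := by
            simp [pvStepA, h, h2, pvBump]
          rw [hstep, ih]
          have hneg : pvNeg d (w :: ws) = pvNeg d ws := by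
            simp [pvNeg, hhits, h, h1]
          have hneu : pvNeu d (w :: ws) = PySem.Str.lower w :: pvNeu d ws := by
            simp [pvNeu, hhits, h, h2]
          have hpos : pvPos d (w :: ws) = pvPos d ws := by
            simp [pvPos, hhits, h, h2]
          rw [hneg, hneu, hpos]
          simp [List.foldl_cons, Prod.mk.injEq]
          omega
        · have hstep : pvStepA d (n, u, p, d1, d2, d3) w =
              (n, u, p + 1, d1, pvBump d2 (PySem.Str.lower w), d3) := by
            simp [pvStepA, h, h1, h2, pvBump]
          rw [hstep, ih]
          have hneg : pvNeg d (w :: ws) = pvNeg d ws := by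
            simp [pvNeg, hhits, h, h1]
          have hneu : pvNeu d (w :: ws) = pvNeu d ws := by
            simp [pvNeu, hhits, h, h2]
          have hpos : pvPos d (w :: ws) = PySem.Str.lower w :: pvPos d ws := by
            simp [pvPos, hhits, h, h1, h2]
          rw [hneg, hneu, hpos]
          simp [List.foldl_cons, Prod.mk.injEq]
          omega

-- ===== VERDICT (by name: the statement is the Claim_ definition above) =====
theorem contagem_por_polaridade_spec : Claim_equal_contagem_por_polaridade := by
  intro sentimentos linha _
  unfold Spec_contagem_por_polaridade contagem_por_polaridade contagem_por_polaridade_alt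
  simp only [pvFold_invariant, PySem.Dict.counter_eq_foldl]
  simp [pvNeg, pvNeu, pvPos, pvHits]
  exact ⟨rfl, rfl, rfl⟩
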